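-- pv_equiv track=rewrite | github.com/PRO100BYTE/CosmicCode-2023 | 4-3_2.py | count_configurations
-- ===== SOURCE A (Python) =====
-- def intersect(rect1, rect2):
--     # Получить координаты вершин прямоугольников
--     x1, y1, x2, y2 = rect1
--     x3, y3, x4, y4 = rect2
--     # Проверить условие отсутствия пересечения
--     if x2 <= x3 or x4 <= x1 or y2 <= y3 or y4 <= y1:
--         return False
--     else:
--         return True
--
-- def combinations(petals):
--     # Импортировать модуль itertools для работы с итераторами
--     import itertools
--     # Создать список для хранения комбинаций
--     result = []
--     # Для каждого количества петалов от 1 до длины списка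
--     for n in range(1, len(petals) + 1):
--         # Добавить в список все комбинации длины n из списка петалов
--         result += list(itertools.combinations(petals, n))
--     # Создать новый список для хранения допустимых комбинаций
--     valid_result = []
--     # Для каждой комбинации петалов в списке
--     for combo in result:
--         # Создать переменную для хранения флага допустимости
--         valid_flag = True
--         # Для каждой пары петалов в комбинации
--         for i in range(len(combo)):
--             for j in range(i + 1, len(combo)):
--                 # Получить координаты вершин прямоугольников петалов
--                 x1, y1, x2, y2 = combo[i]
--                 x3, y3, x4, y4 = combo[j]
--                 # Проверить условие допустимости: петалы должны располагаться горизонтально или вертикально относительно друг друга и иметь одинаковую длину или ширину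
--                 if not ((x1 == x3 or x2 == x4) and (y2 - y1 == y4 - y3) or (y1 == y3 or y2 == y4) and (x2 - x1 == x4 - x3)):
--                     # Установить флаг допустимости в False и выйти из цикла
--                     valid_flag = False
--                     break
--             # Если флаг допустимости установлен в False
--             if not valid_flag:
--                 # Выйти из цикла
--                 break
--         # Если флаг допустимости установлен в True
--         if valid_flag:
--             # Добавить комбинацию в новый список допустимых комбинаций
--             valid_result.append(combo)
--     # Вернуть новый список допустимых комбинаций
--     return valid_result
--
-- def count_configurations(petals):
--     # Получить все возможные комбинации петалов
--     combos = combinations(petals)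
--     # Создать переменную для хранения количества конфигураций
--     count = 0
--     # Для каждой комбинации петалов
--     for combo in combos:
--         # Создать переменную для хранения флага пересечения
--         intersect_flag = False
--         # Для каждой пары петалов в комбинации
--         for i in range(len(combo)):
--             for j in range(i + 1, len(combo)):
--                 # Если петалы пересекаются
--                 if intersect(combo[i], combo[j]):
--                     # Установить флаг пересечения в True и выйти из цикла
--                     intersect_flag = True
--                     break
--             # Если флаг пересечения установлен в True
--             if intersect_flag:
--                 # Выйти из цикла
--                 break
--         # Если флаг пересечения не установлен в True
--         if not intersect_flag:
--             # Увеличить количество конфигураций на 1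
--             count += 1
--     # Вернуть количество конфигураций
--     return count
-- ===== SOURCE B (Python) =====
-- def count_configurations(petals):
--     # DFS clique counting over the pairwise "compatible" relation
--     # (aligned and non-overlapping), pruning incompatible candidates early
--     # instead of enumerating and re-checking every combination.
--     def compatible(a, b):
--         x1, y1, x2, y2 = a
--         x3, y3, x4, y4 = b
--         aligned = ((x1 == x3 or x2 == x4) and (y2 - y1 == y4 - y3)
--                    or (y1 == y3 or y2 == y4) and (x2 - x1 == x4 - x3))
--         overlap = not (x2 <= x3 or x4 <= x1 or y2 <= y3 or y4 <= y1)
--         return aligned and not overlap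
--
--     def go(cands):
--         if not cands:
--             return 0
--         r, rest = cands[0], cands[1:]
--         return 1 + go([s for s in rest if compatible(r, s)]) + go(rest)
--
--     return go(list(petals))
-- ===== Notes on version B (the rewrite author's own statement) =====
-- stated objective: faster
-- what changed: Instead of materialising every combination of every size via itertools and re-checking all pairs twice (alignment pass, then intersection pass), B counts configurations by a pruned DFS over the pairwise compatibility relation: each vertex extends the current clique and the candidate list is filtered to rectangles compatible with it, so incompatible subsets are never generated.
import Mathlib
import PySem

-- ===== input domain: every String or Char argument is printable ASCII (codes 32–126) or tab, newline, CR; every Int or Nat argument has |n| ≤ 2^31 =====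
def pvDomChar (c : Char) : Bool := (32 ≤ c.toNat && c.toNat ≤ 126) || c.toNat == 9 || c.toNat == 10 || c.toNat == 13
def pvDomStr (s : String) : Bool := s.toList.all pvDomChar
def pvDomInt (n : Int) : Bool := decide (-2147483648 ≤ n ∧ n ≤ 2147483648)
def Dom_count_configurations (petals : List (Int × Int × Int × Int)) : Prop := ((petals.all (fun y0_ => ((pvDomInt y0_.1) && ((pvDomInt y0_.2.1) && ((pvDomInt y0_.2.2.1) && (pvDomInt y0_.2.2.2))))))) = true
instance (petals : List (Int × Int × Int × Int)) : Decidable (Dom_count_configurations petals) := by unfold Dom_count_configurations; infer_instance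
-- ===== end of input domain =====

-- B replaces A's enumerate-all-combinations-then-check with a pruned DFS over the
-- pairwise-compatibility relation (faster: incompatible extensions are cut off early).

-- ===== PORT A =====
-- intersect(rect1, rect2)
def intersectA (r1 r2 : Int × Int × Int × Int) : Bool :=
  let (x1, y1, x2, y2) := r1
  let (x3, y3, x4, y4) := r2
  if x2 ≤ x3 || x4 ≤ x1 || y2 ≤ y3 || y4 ≤ y1 then false else true

-- the alignment condition tested inside combinations' validity loop
def alignA (r1 r2 : Int × Int × Int × Int) : Bool :=
  let (x1, y1, x2, y2) := r1
  let (x3, y3, x4, y4) := r2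
  ((x1 == x3 || x2 == x4) && (y2 - y1 == y4 - y3)) ||
    ((y1 == y3 || y2 == y4) && (x2 - x1 == x4 - x3))

-- the nested i<j loop with break: check x against all later elements, then recurse
def validA : List (Int × Int × Int × Int) → Bool
  | [] => true
  | x :: t => t.all (fun y => alignA x y) && validA t

-- the nested i<j loop with break in count_configurations
def interAnyA : List (Int × Int × Int × Int) → Bool
  | [] => false
  | x :: t => t.any (fun y => intersectA x y) || interAnyA t

-- combinations(petals)
def combinationsA (petals : List (Int × Int × Int × Int)) : List (List (Int × Int × Int × Int)) :=
  let result := (PySem.List.pyRange 1 ((petals.length : Int) + 1) 1).foldl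
    (fun acc n => acc ++ PySem.List.combinations petals n.toNat) []
  result.filter validA

def count_configurations (petals : List (Int × Int × Int × Int)) : Int :=
  let combos := combinationsA petals
  combos.foldl (fun count combo => if !interAnyA combo then count + 1 else count) 0

-- ===== PORT B =====
-- compatible(a, b) from Source B
def compatB (a b : Int × Int × Int × Int) : Bool :=
  let (x1, y1, x2, y2) := a
  let (x3, y3, x4, y4) := b
  let aligned := ((x1 == x3 || x2 == x4) && (y2 - y1 == y4 - y3)) ||
    ((y1 == y3 || y2 == y4) && (x2 - x1 == x4 - x3))
  let overlap := !(x2 ≤ x3 || x4 ≤ x1 || y2 ≤ y3 || y4 ≤ y1)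
  aligned && !overlap

-- go(cands) from Source B: DFS clique counting with candidate pruning
def goB : List (Int × Int × Int × Int) → Int
  | [] => 0
  | r :: rest => 1 + goB (rest.filter (fun s => compatB r s)) + goB rest
termination_by cands => cands.length
decreasing_by
  · simpa using Nat.lt_succ_of_le (List.length_filter_le _ _)
  · exact Nat.lt_succ_self _

def count_configurations_alt (petals : List (Int × Int × Int × Int)) : Int :=
  goB petals

-- ===== PRECONDITION & SPEC =====
def Spec_count_configurations (petals : List (Int × Int × Int × Int)) (out : Int) : Prop := out = count_configurations_alt petals
instance (petals : List (Int × Int × Int × Int)) (out : Int) : Decidable (Spec_count_configurations petals out) := by unfold Spec_count_configurations; infer_instance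

-- ===== CLAIM (what is proved, stated in full; the proofs are below) =====
def Claim_equal_count_configurations : Prop := ∀ (petals : List (Int × Int × Int × Int)), Dom_count_configurations petals → Spec_count_configurations petals (count_configurations petals)

-- ===== LEMMAS AND PROOFS =====

-- all subsequences (in order), structural form
def subL : List (Int × Int × Int × Int) → List (List (Int × Int × Int × Int))
  | [] => [[]]
  | x :: t => subL t ++ (subL t).map (x :: ·)

-- pairwise compatibility of a combination
def pwB : List (Int × Int × Int × Int) → Bool
  | [] => true
  | x :: t => t.all (fun y => compatB x y) && pwB t

-- concatenation of combinations of sizes 1..m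
def combosUpTo (m : Nat) (xs : List (Int × Int × Int × Int)) : List (List (Int × Int × Int × Int)) :=
  (List.range m).flatMap (fun k => PySem.List.combinations xs (k + 1))

theorem compatB_eq (a b : Int × Int × Int × Int) :
    compatB a b = (alignA a b && !intersectA a b) := by
  obtain ⟨x1, y1, x2, y2⟩ := a
  obtain ⟨x3, y3, x4, y4⟩ := b
  simp only [compatB, alignA, intersectA]
  split <;> simp_all

theorem all_compat (x : Int × Int × Int × Int) :
    ∀ t : List (Int × Int × Int × Int),
    t.all (fun y => compatB x y) = (t.all (fun y => alignA x y) && !t.any (fun y => intersectA x y))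
  | [] => rfl
  | y :: t => by
    rw [List.all_cons, List.all_cons, List.any_cons, all_compat x t, compatB_eq]
    simp only [Bool.not_or]
    generalize alignA x y = a
    generalize intersectA x y = b
    generalize t.all (fun y => alignA x y) = A
    generalize t.any (fun y => intersectA x y) = B
    cases a <;> cases b <;> cases A <;> cases B <;> rfl

theorem valid_inter_eq_pw :
    ∀ l : List (Int × Int × Int × Int), (validA l && !interAnyA l) = pwB l
  | [] => rfl
  | x :: t => by
    simp only [validA, interAnyA, pwB, Bool.not_or, ← valid_inter_eq_pw t, all_compat x t]
    generalize t.all (fun y => alignA x y) = a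
    generalize t.any (fun y => intersectA x y) = b
    generalize validA t = A
    generalize interAnyA t = B
    cases a <;> cases b <;> cases A <;> cases B <;> rfl

theorem flatMap_append_perm {α β : Type} (f g : α → List β) :
    ∀ l : List α, (l.flatMap (fun k => f k ++ g k)).Perm (l.flatMap f ++ l.flatMap g)
  | [] => List.Perm.refl _
  | x :: l => by
    simp only [List.flatMap_cons, List.append_assoc]
    refine List.Perm.append_left (f x) ?_
    refine (List.Perm.append_left (g x) (flatMap_append_perm f g l)).trans ?_
    rw [← List.append_assoc, ← List.append_assoc]
    exact List.Perm.append_right _ List.perm_append_comm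

theorem combosUpTo_length_cons (x : Int × Int × Int × Int) (t : List (Int × Int × Int × Int)) :
    (combosUpTo (t.length + 1) (x :: t)).Perm
      (([] :: combosUpTo t.length t).map (x :: ·) ++ combosUpTo t.length t) := by
  have h1 : combosUpTo (t.length + 1) (x :: t)
      = (List.range (t.length + 1)).flatMap
          (fun k => (PySem.List.combinations t k).map (x :: ·) ++ PySem.List.combinations t (k + 1)) := by
    simp only [combosUpTo, PySem.List.combinations_cons_succ]
  rw [h1]
  refine (flatMap_append_perm _ _ _).trans ?_
  have h2 : (List.range (t.length + 1)).flatMap (fun k => (PySem.List.combinations t k).map (x :: ·))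
      = (([] :: combosUpTo t.length t).map (x :: ·)) := by
    rw [List.range_succ_eq_map]
    simp only [List.flatMap_cons, PySem.List.combinations_zero, List.flatMap_map, combosUpTo,
      List.map_flatMap, List.map_cons]
    rfl
  have h3 : (List.range (t.length + 1)).flatMap (fun k => PySem.List.combinations t (k + 1))
      = combosUpTo t.length t := by
    have hz : PySem.List.combinations t (t.length + 1) = [] :=
      PySem.List.combinations_eq_nil_of_length_lt _ (by omega)
    rw [List.range_succ, List.flatMap_append]
    simp [combosUpTo, hz]
  rw [h2, h3]

theorem perm_sub : ∀ xs : List (Int × Int × Int × Int),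
    ([] :: combosUpTo xs.length xs).Perm (subL xs)
  | [] => by simp [combosUpTo, subL]
  | x :: t => by
    have step := combosUpTo_length_cons x t
    have ih := perm_sub t
    show ([] :: combosUpTo (t.length + 1) (x :: t)).Perm (subL t ++ (subL t).map (x :: ·))
    refine (List.Perm.cons _ step).trans ?_
    refine List.Perm.trans ?_ (List.Perm.append ih (ih.map (x :: ·)))
    exact List.Perm.cons _ List.perm_append_comm

theorem subfilter (p : Int × Int × Int × Int → Bool) :
    ∀ (xs : List (Int × Int × Int × Int)) (Q : List (Int × Int × Int × Int) → Bool),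
    (subL (xs.filter p)).countP Q = (subL xs).countP (fun l => l.all p && Q l)
  | [], Q => by simp [subL]
  | x :: t, Q => by
    by_cases h : p x
    · rw [List.filter_cons_of_pos h]
      simp only [subL, List.countP_append, List.countP_map, Function.comp_def]
      rw [subfilter p t Q, subfilter p t (fun l => Q (x :: l))]
      simp [List.all_cons, h]
    · rw [List.filter_cons_of_neg h]
      simp only [subL, List.countP_append, List.countP_map, Function.comp_def, subfilter p t Q]
      have hzero : ((subL t).countP fun l => (x :: l).all p && Q (x :: l)) = 0 := by
        simp [List.all_cons, h]
      simp only [List.all_cons] at hzero ⊢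
      omega

theorem goB_eq : ∀ (n : Nat) (xs : List (Int × Int × Int × Int)), xs.length ≤ n →
    1 + goB xs = ((subL xs).countP pwB : Int)
  | _, [], _ => by simp [goB, subL, pwB]
  | n + 1, x :: t, h => by
    have hlen : t.length ≤ n := by simpa using h
    have ihf : 1 + goB (t.filter (fun s => compatB x s)) =
        ((subL (t.filter (fun s => compatB x s))).countP pwB : Int) :=
      goB_eq n _ (le_trans (List.length_filter_le _ _) hlen)
    have iht := goB_eq n t hlen
    have hsf := subfilter (fun s => compatB x s) t pwB
    have hpt : ∀ l, (l.all (fun s => compatB x s) && pwB l) = pwB (x :: l) := fun l => rfl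
    simp only [hpt] at hsf
    have hsub : ((subL (x :: t)).countP pwB : Int)
        = ((subL t).countP pwB : Int) + ((subL t).countP (fun l => pwB (x :: l)) : Int) := by
      simp [subL, List.countP_append, List.countP_map, Function.comp_def]
    rw [goB, hsub, ← hsf, ← ihf, ← iht]
    ring

theorem foldl_count_int (p : List (Int × Int × Int × Int) → Bool) :
    ∀ (l : List (List (Int × Int × Int × Int))) (c : Int),
    l.foldl (fun count combo => if !p combo then count + 1 else count) c
      = c + (l.countP (fun combo => !p combo) : Int)
  | [], c => by simp
  | x :: l, c => by
    rw [List.foldl_cons, List.countP_cons]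
    by_cases h : p x
    · simp only [h, Bool.not_true, Bool.false_eq_true, if_false]
      rw [foldl_count_int p l c]
      simp
    · rw [Bool.not_eq_true] at h
      simp only [h, Bool.not_false, if_true]
      rw [foldl_count_int p l (c + 1)]
      simp
      ring

theorem resultA_eq (petals : List (Int × Int × Int × Int)) :
    (PySem.List.pyRange 1 ((petals.length : Int) + 1) 1).foldl
      (fun acc n => acc ++ PySem.List.combinations petals n.toNat) []
    = combosUpTo petals.length petals := by
  rw [PySem.List.foldl_append_eq_flatMap]
  rw [show ((petals.length : Int) + 1) = (1 : Int) + petals.length by ring]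
  rw [PySem.List.pyRange_one]
  simp only [List.nil_append, add_sub_cancel_left, Int.toNat_natCast, List.flatMap_map, combosUpTo]
  congr 1
  funext k
  congr 1
  omega

theorem count_configurations_spec : Claim_equal_count_configurations := by
  intro petals _
  unfold Spec_count_configurations count_configurations count_configurations_alt combinationsA
  rw [resultA_eq]
  rw [foldl_count_int]
  have hpf : ((combosUpTo petals.length petals).filter validA).countP (fun combo => !interAnyA combo)
      = (combosUpTo petals.length petals).countP pwB := by
    rw [List.countP_filter]
    exact List.countP_congr (fun l _ => by
      rw [← valid_inter_eq_pw l]; cases validA l <;> cases interAnyA l <;> rfl)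
  have hperm := (perm_sub petals).countP_eq pwB
  have hgo := goB_eq petals.length petals (le_refl _)
  simp [pwB] at hperm
  rw [hpf]
  omega
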